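-- pv_equiv track=rewrite | github.com/Tonyfc52/IR | Homework4/Med/4_Final_tfidf and POS.py | querytoarray
-- ===== SOURCE A (Python) =====
-- def querytoarray(query, feature):
--     queryterm = query.split(' ')
--     exclude = []
--     vector = [0 for i in range(len(feature))]
--     for i in queryterm:
--         flag = 0
--         for j in range(len(feature)):
--             if i.lower() == feature[j]:
--                 vector[j] += 1
--                 flag = 1
--         if flag == 0:
--             exclude.append(i)  # 得到未建立向量的搜尋字
--     return vector, exclude
-- ===== SOURCE B (Python) =====
-- def querytoarray(query, feature):
--     terms = query.split(' ')
--     counts = {}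
--     for t in terms:
--         l = t.lower()
--         counts[l] = counts.get(l, 0) + 1
--     vector = [counts.get(f, 0) for f in feature]
--     fset = set(feature)
--     exclude = [t for t in terms if t.lower() not in fset]
--     return vector, exclude
-- ===== Notes on version B (the rewrite author's own statement) =====
-- stated objective: faster
-- what changed: Replaces the term-by-feature nested scan with a single term-frequency table built in one pass over the terms, vector read off by iterating features with table lookups, and exclude computed against a set of features.
import Mathlib
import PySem

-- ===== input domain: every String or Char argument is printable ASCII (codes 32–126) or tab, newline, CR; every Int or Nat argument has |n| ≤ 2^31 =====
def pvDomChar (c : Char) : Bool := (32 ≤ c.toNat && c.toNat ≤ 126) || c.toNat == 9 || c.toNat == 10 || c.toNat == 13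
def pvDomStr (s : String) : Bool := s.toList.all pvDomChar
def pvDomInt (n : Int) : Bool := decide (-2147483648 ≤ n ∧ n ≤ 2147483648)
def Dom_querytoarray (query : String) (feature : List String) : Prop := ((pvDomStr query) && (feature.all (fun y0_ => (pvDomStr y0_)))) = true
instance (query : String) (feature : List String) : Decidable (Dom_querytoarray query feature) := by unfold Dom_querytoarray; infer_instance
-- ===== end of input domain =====

-- B replaces A's term-by-feature nested scan with a one-pass term-frequency table
-- (vector read off per feature) and a feature set for exclude: asymptotically fewer comparisons.


-- ===== PORT A =====
-- inner loop 'for j in range(len(feature)): if i.lower() == feature[j]: vector[j] += 1; flag = 1'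
def pvInnerStep (i : String) (feature : List String) (s : List Int × Int) (j : Nat) : List Int × Int :=
  if PySem.Str.lower i == feature.getD j "" then (s.1.set j (s.1.getD j 0 + 1), 1) else s

-- one iteration of 'for i in queryterm' over the state (vector, exclude)
def pvOuterStep (feature : List String) (st : List Int × List String) (i : String) : List Int × List String :=
  let r := (List.range feature.length).foldl (pvInnerStep i feature) (st.1, 0)
  if r.2 == 0 then (r.1, st.2 ++ [i]) else (r.1, st.2)

def querytoarray (query : String) (feature : List String) : List Int × List String :=
  let queryterm := (PySem.Str.split? query " ").getD []   -- sep " " is non-empty, split? is always some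
  let vector : List Int := (List.range feature.length).map (fun _ => (0 : Int))
  queryterm.foldl (pvOuterStep feature) (vector, [])

-- ===== PORT B =====
def querytoarray_alt (query : String) (feature : List String) : List Int × List String :=
  let terms := (PySem.Str.split? query " ").getD []   -- sep " " is non-empty, split? is always some
  let counts := terms.foldl (fun (d : PySem.Dict String Int) t =>
      let l := PySem.Str.lower t
      d.insert l (d.getD l 0 + 1)) PySem.Dict.empty
  let vector := feature.map (fun f => counts.getD f 0)
  let fset := PySem.Set.ofList feature
  let exclude := terms.filter (fun t => !(PySem.Set.contains fset (PySem.Str.lower t)))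
  (vector, exclude)

-- ===== PRECONDITION & SPEC =====
def Spec_querytoarray (query : String) (feature : List String) (out : List Int × List String) : Prop := out = querytoarray_alt query feature
instance (query : String) (feature : List String) (out : List Int × List String) : Decidable (Spec_querytoarray query feature out) := by unfold Spec_querytoarray; infer_instance

-- ===== CLAIM (what is proved, stated in full; the proofs are below) =====
def Claim_equal_querytoarray : Prop := ∀ (query : String) (feature : List String), Dom_querytoarray query feature → Spec_querytoarray query feature (querytoarray query feature)

-- ===== LEMMAS AND PROOFS =====

-- shifting the inner index loop one feature to the right
theorem pvInner_shift (i f0 : String) (fs : List String) (L : List Nat) :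
    ∀ (v0 : Int) (vec : List Int) (flag : Int),
      L.foldl (fun s j => pvInnerStep i (f0 :: fs) s (j+1)) (v0 :: vec, flag)
        = ((L.foldl (pvInnerStep i fs) (vec, flag)).1.cons v0,
           (L.foldl (pvInnerStep i fs) (vec, flag)).2) := by
  induction L with
  | nil => intro v0 vec flag; rfl
  | cons j L ih =>
      intro v0 vec flag
      have hstep : pvInnerStep i (f0 :: fs) (v0 :: vec, flag) (j+1)
          = (v0 :: (pvInnerStep i fs (vec, flag) j).1, (pvInnerStep i fs (vec, flag) j).2) := by
        simp only [pvInnerStep, List.getD_cons_succ]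
        split_ifs <;> simp [List.getD]
      simp only [List.foldl_cons]
      rw [hstep]
      exact ih _ _ _

-- characterisation of A's inner loop
theorem pvInner_spec (i : String) :
    ∀ (fs : List String) (vec : List Int) (flag : Int), vec.length = fs.length →
      (List.range fs.length).foldl (pvInnerStep i fs) (vec, flag)
        = (List.zipWith (fun f v => if PySem.Str.lower i = f then v + 1 else v) fs vec,
           if PySem.Str.lower i ∈ fs then 1 else flag) := by
  intro fs
  induction fs with
  | nil => intro vec flag h; simp at h; simp [h]
  | cons f fs ih =>
      intro vec flag h
      match vec with
      | [] => simp at h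
      | v :: vs =>
        simp only [List.length_cons] at h ⊢
        rw [List.range_succ_eq_map]
        simp only [List.foldl_cons, List.foldl_map]
        have hstep : pvInnerStep i (f :: fs) (v :: vs, flag) 0
            = ((if PySem.Str.lower i = f then v + 1 else v) :: vs,
               if PySem.Str.lower i = f then 1 else flag) := by
          simp only [pvInnerStep, List.getD_cons_zero, List.set_cons_zero]
          by_cases h0 : PySem.Str.lower i = f
          · simp [h0]
          · simp [beq_eq_false_iff_ne.mpr h0, h0]
        rw [hstep, pvInner_shift, ih vs _ (by omega)]
        by_cases h0 : PySem.Str.lower i = f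
        · simp [h0, List.mem_cons]
        · simp [h0, List.mem_cons]

-- pointwise composition of two zipWith passes over the same feature list
theorem pvZip_comp (g h : String → Int → Int) :
    ∀ (fs : List String) (vec : List Int),
      List.zipWith g fs (List.zipWith h fs vec) = List.zipWith (fun f v => g f (h f v)) fs vec := by
  intro fs
  induction fs with
  | nil => intro vec; simp
  | cons f fs ih =>
      intro vec
      match vec with
      | [] => simp
      | v :: vs => simp [ih]

-- a zipWith whose function ignores the features is the identity on the vector
theorem pvZip_id : ∀ (fs : List String) (vec : List Int), vec.length ≤ fs.length →
    List.zipWith (fun _ v => v) fs vec = vec := by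
  intro fs
  induction fs with
  | nil => intro vec h; simp at h ⊢; omega
  | cons f fs ih =>
      intro vec h
      match vec with
      | [] => simp
      | v :: vs => simp at h ⊢; exact ih vs (by omega)

-- characterisation of A's outer loop
theorem pvOuter_spec (fs : List String) :
    ∀ (terms : List String) (vec : List Int) (ex : List String), vec.length = fs.length →
      terms.foldl (pvOuterStep fs) (vec, ex)
        = (List.zipWith (fun f v => v + ((terms.map PySem.Str.lower).count f : Int)) fs vec,
           ex ++ terms.filter (fun t => !(fs.contains (PySem.Str.lower t)))) := by
  intro terms
  induction terms with
  | nil =>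
      intro vec ex h
      simp only [List.foldl_nil, List.map_nil, List.count_nil, List.filter_nil, List.append_nil,
        Nat.cast_zero, add_zero]
      rw [pvZip_id fs vec (by omega)]
  | cons t ts ih =>
      intro vec ex h
      simp only [List.foldl_cons]
      have hstep : pvOuterStep fs (vec, ex) t
          = (List.zipWith (fun f v => if PySem.Str.lower t = f then v + 1 else v) fs vec,
             if PySem.Str.lower t ∈ fs then ex else ex ++ [t]) := by
        unfold pvOuterStep
        rw [pvInner_spec t fs vec 0 h]
        by_cases hm : PySem.Str.lower t ∈ fs
        · simp [hm]
        · simp [hm]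
      rw [hstep, ih _ _ (by simp [List.length_zipWith]; omega)]
      rw [pvZip_comp]
      simp only [Prod.mk.injEq]
      refine ⟨?_, ?_⟩
      · -- vectors agree
        congr 1
        funext f v
        by_cases h0 : PySem.Str.lower t = f
        · simp [h0]; ring
        · simp [h0]
      · -- excludes agree
        by_cases hm : PySem.Str.lower t ∈ fs
        · simp [hm]
        · simp [hm]

-- zipWith against a replicate collapses to a map over the features
theorem pvZip_replicate (g : String → Int → Int) (c : Int) :
    ∀ (fs : List String), List.zipWith g fs (List.replicate fs.length c) = fs.map (fun f => g f c) := by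
  intro fs
  induction fs with
  | nil => simp
  | cons f fs ih => simp [List.replicate_succ, ih]

-- ===== VERDICT (by name: the statement is the Claim_ definition above) =====
theorem querytoarray_spec : Claim_equal_querytoarray := by
  intro query feature _
  unfold Spec_querytoarray querytoarray querytoarray_alt
  rw [pvOuter_spec feature _ _ _ (by simp)]
  have hcnt : ((PySem.Str.split? query " ").getD []).foldl
      (fun (d : PySem.Dict String Int) t =>
        let l := PySem.Str.lower t
        d.insert l (d.getD l 0 + 1)) PySem.Dict.empty
      = PySem.Dict.counter (((PySem.Str.split? query " ").getD []).map PySem.Str.lower) := by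
    rw [← PySem.Dict.foldl_insert_getD_add_one_eq_counter, List.foldl_map]
  simp only [hcnt]
  simp only [Prod.mk.injEq]
  refine ⟨?_, ?_⟩
  · rw [show (List.range feature.length).map (fun _ => (0:Int))
        = List.replicate feature.length 0 by simp [List.map_const'],
      pvZip_replicate]
    congr 1
    funext f
    rw [PySem.Dict.getD_counter]
    simp
  · rw [List.nil_append]
    apply List.filter_congr
    intro t _
    simp [pysem]
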